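-- pv_equiv track=rewrite | github.com/varaher/ErPrana | backend/routes/structured_medical_interview.py | determine_triage_level
-- ===== SOURCE A (Python) =====
-- from typing import Dict, Any, Optional, List
--
-- def determine_triage_level(flags: List[Dict[str, Any]]) -> str:
--     """Determine overall triage level from triggered flags"""
--     if any(f['triage'] == 'red' for f in flags):
--         return 'red'
--     elif any(f['triage'] == 'orange' for f in flags):
--         return 'orange'
--     elif any(f['triage'] == 'yellow' for f in flags):
--         return 'yellow'
--     else:
--         return 'green'
-- ===== SOURCE B (Python) =====
-- def determine_triage_level(flags):
--     """Determine overall triage level from triggered flags"""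
--     seen_orange = seen_yellow = False
--     for f in flags:
--         t = f['triage']
--         if t == 'red':
--             return 'red'
--         if t == 'orange':
--             seen_orange = True
--         elif t == 'yellow':
--             seen_yellow = True
--     if seen_orange:
--         return 'orange'
--     if seen_yellow:
--         return 'yellow'
--     return 'green'
-- ===== Notes on version B (the rewrite author's own statement) =====
-- stated objective: simpler
-- what changed: Replaces the three separate any-scans over flags with a single pass that returns 'red' immediately and records whether orange/yellow were seen.
import Mathlib
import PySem

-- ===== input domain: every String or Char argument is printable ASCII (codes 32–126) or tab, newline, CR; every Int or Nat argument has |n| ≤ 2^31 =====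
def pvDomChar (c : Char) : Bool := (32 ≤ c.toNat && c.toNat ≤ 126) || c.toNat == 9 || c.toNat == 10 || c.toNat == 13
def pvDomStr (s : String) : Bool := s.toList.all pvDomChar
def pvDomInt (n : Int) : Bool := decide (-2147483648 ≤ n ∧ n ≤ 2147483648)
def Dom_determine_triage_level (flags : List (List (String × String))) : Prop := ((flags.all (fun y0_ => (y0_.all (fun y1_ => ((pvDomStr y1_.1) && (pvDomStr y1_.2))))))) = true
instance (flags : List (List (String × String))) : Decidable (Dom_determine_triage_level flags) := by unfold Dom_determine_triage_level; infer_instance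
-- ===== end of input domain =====

-- B replaces A's three any-scans with a single pass (early return on red, booleans for orange/yellow); return value only.
-- Both programs raise KeyError on a flag without a 'triage' key reached before any red flag; Pre_ excludes exactly those inputs.

-- ===== PORT A =====
-- f['triage'] : first-match lookup; missing key raises KeyError in Python (outside Pre_); the port reads "" there.
def pvTriage (f : List (String × String)) : String := (f.lookup "triage").getD ""

def determine_triage_level (flags : List (List (String × String))) : String :=
  if flags.any (fun f => pvTriage f == "red") then "red"
  else if flags.any (fun f => pvTriage f == "orange") then "orange"
  else if flags.any (fun f => pvTriage f == "yellow") then "yellow"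
  else "green"

-- ===== PORT B =====
def dtlLoop : List (List (String × String)) → Bool → Bool → String
  | [], seenOrange, seenYellow =>
      if seenOrange then "orange" else if seenYellow then "yellow" else "green"
  | f :: rest, seenOrange, seenYellow =>
      let t := pvTriage f
      if t == "red" then "red"
      else dtlLoop rest (seenOrange || t == "orange") (seenYellow || t == "yellow")

def determine_triage_level_alt (flags : List (List (String × String))) : String :=
  dtlLoop flags false false

-- ===== PRECONDITION & SPEC =====
-- Pre_ excludes inputs where Python A raises KeyError: every flag before the first red one must carry a 'triage' key.
def Pre_determine_triage_level (flags : List (List (String × String))) : Prop :=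
  ∀ f ∈ flags.takeWhile (fun f => ¬ (f.lookup "triage" = some "red")), (f.lookup "triage").isSome = true
instance (flags : List (List (String × String))) : Decidable (Pre_determine_triage_level flags) := by unfold Pre_determine_triage_level; infer_instance

def pvWitness_determine_triage_level : (List (List (String × String))) :=
  [[("triage", "yellow")], [("triage", "orange")]]

def Spec_determine_triage_level (flags : List (List (String × String))) (out : String) : Prop := out = determine_triage_level_alt flags
instance (flags : List (List (String × String))) (out : String) : Decidable (Spec_determine_triage_level flags out) := by unfold Spec_determine_triage_level; infer_instance

-- ===== CLAIM (what is proved, stated in full; the proofs are below) =====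
def Claim_equal_determine_triage_level : Prop := ∀ (flags : List (List (String × String))), Dom_determine_triage_level flags → Pre_determine_triage_level flags → Spec_determine_triage_level flags (determine_triage_level flags)

-- ===== LEMMAS AND PROOFS =====
theorem dtlLoop_eq (flags : List (List (String × String))) (so sy : Bool) :
    dtlLoop flags so sy =
      if flags.any (fun f => pvTriage f == "red") then "red"
      else if so || flags.any (fun f => pvTriage f == "orange") then "orange"
      else if sy || flags.any (fun f => pvTriage f == "yellow") then "yellow"
      else "green" := by
  induction flags generalizing so sy with
  | nil => simp [dtlLoop]
  | cons f rest ih =>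
      simp only [dtlLoop, List.any_cons]
      by_cases hr : pvTriage f == "red"
      · simp [hr]
      · rw [Bool.not_eq_true] at hr
        simp only [hr, Bool.false_or]
        rw [ih]
        by_cases h : (rest.any fun f => pvTriage f == "red") = true
        · simp [h]
        · rw [Bool.not_eq_true] at h
          simp only [h, if_neg Bool.false_ne_true]
          by_cases ho : pvTriage f == "orange" <;>
          by_cases hy : pvTriage f == "yellow" <;>
            simp_all [Bool.or_assoc]

-- ===== VERDICT (by name: the statement is the Claim_ definition above) =====
theorem determine_triage_level_spec : Claim_equal_determine_triage_level := by
  intro flags _ _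
  unfold Spec_determine_triage_level determine_triage_level determine_triage_level_alt
  rw [dtlLoop_eq]
  simp
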